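-- pv_equiv track=rewrite | github.com/yayi2456/AnalysisScaning | finalTest/InitChainAndNodes.py | scan_blocklist_no_repeat
-- ===== SOURCE A (Python) =====
-- def scan_blocklist_no_repeat(m,beginID,endID,blocklist,max_level):
--     """(int,int,int,list of list of int,int) -> list of int
--
--     Return a list of blockIDs that are used to construct a proof at endID.
--     """
--
--     chosen_blocks=[]
--
--     this_level=max_level
--     this_blockID=beginID
--     # to determine if it's the first time that we access the block
--     block_scanned_times=[0]*(endID-beginID)
--
--     # append blocks useful for proof at endID
--     while this_level>0:
--         this_level_blocks=0
--         while this_blockID<endID: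
--             # occur a valid block in level this_level
--             if block_scanned_times[this_blockID-beginID]==0:
--                 this_level_blocks+=1
--             # find the next block
--             this_blockID=blocklist[this_blockID-beginID][this_level]
--         # reset block pointer
--         this_blockID=beginID
--         # if this_level has less than m block, no blocks are appeded
--         if this_level_blocks<m:
--             this_level-=1
--             # this_blockID=beginID
--             continue
--         # append the last m valid blocks
--         scanned_blocks=0
--         while scanned_blocks<this_level_blocks-m:
--             if block_scanned_times[this_blockID-beginID]==0:
--                 scanned_blocks+=1
--             this_blockID=blocklist[this_blockID-beginID][this_level]
--         while scanned_blocks<this_level_blocks: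
--             if block_scanned_times[this_blockID-beginID]==0:
--                 block_scanned_times[this_blockID-beginID]=1
--                 scanned_blocks+=1
--                 # add this block
--                 chosen_blocks.append(this_blockID)
--             this_blockID=blocklist[this_blockID-beginID][this_level]
--         # step into the next level
--         this_level-=1
--         # reset the first block
--         this_blockID=beginID
--
--     return chosen_blocks
-- ===== SOURCE B (Python) =====
-- def scan_blocklist_no_repeat(m, beginID, endID, blocklist, max_level):
--     """(int,int,int,list of list of int,int) -> list of int
--
--     Per level (max_level down to 1): one forward traversal collects the still
--     unvisited blocks in order; if at least m were collected, the last m are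
--     marked visited and appended to the result.
--     """
--     chosen_blocks = []
--     visited = [0] * (endID - beginID)
--     for level in range(max_level, 0, -1):
--         collected = []
--         b = beginID
--         while b < endID:
--             if visited[b - beginID] == 0:
--                 collected.append(b)
--             b = blocklist[b - beginID][level]
--         if len(collected) >= m:
--             last = collected[len(collected) - m:]
--             for b in last:
--                 visited[b - beginID] = 1
--             chosen_blocks.extend(last)
--     return chosen_blocks
-- ===== Notes on version B (the rewrite author's own statement) =====
-- stated objective: simpler
-- what changed: A makes three chain walks per level (count the unvisited blocks, re-walk skipping count-m of them, re-walk appending and marking the rest); B makes one walk per level that collects the unvisited blocks in traversal order, then takes the last m by a slice and marks exactly those.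
-- outside the precondition, e.g. on scan_blocklist_no_repeat(1, 0, 2, [[0, 5], [0, 0]], 1): A returns [0], B returns [0]; on scan_blocklist_no_repeat(1, 0, 2, [[9, -1], [0, 9]], 1): A returns [-1], B returns [-1]; on scan_blocklist_no_repeat(-1, 0, 1, [[0, 2]], 1): A raises IndexError, B returns []
import Mathlib
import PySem

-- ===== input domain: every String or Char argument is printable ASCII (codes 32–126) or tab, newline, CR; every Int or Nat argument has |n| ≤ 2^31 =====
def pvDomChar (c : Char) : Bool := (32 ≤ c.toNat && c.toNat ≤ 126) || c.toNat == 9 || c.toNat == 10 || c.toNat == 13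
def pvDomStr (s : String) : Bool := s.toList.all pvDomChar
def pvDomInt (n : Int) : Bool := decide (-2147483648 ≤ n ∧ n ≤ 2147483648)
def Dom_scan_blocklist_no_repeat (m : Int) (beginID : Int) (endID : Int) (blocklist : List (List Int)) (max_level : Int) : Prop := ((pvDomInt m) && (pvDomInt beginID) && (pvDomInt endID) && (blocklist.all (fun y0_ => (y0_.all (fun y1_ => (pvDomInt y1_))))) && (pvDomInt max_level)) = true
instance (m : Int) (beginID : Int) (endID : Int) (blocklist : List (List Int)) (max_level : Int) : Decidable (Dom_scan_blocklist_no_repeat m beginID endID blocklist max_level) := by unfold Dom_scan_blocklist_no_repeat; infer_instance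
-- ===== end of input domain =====

-- B replaces A's three chain walks per level (count, skip, append+mark) by one walk that
-- collects the unvisited blocks, then slices off the last m and marks them (objective: simpler).

-- shared index primitives (exact where Pre_ holds: all used indexes are nonnegative and in range)
def pvStGet (st : List Int) (i : Int) : Int := (PySem.List.pyGet? st i).getD 0
def pvMark (st : List Int) (i : Int) : List Int := if 0 ≤ i then st.set i.toNat 1 else st
def pvNext (bl : List (List Int)) (lvl : Int) (i : Int) : Int :=
  (PySem.List.pyGet? ((PySem.List.pyGet? bl i).getD []) lvl).getD 0

-- ===== PORT A =====
-- inner 'while this_blockID<endID' counting loop (fuel bounds the walk; under Pre_ it never runs out)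
def pvCount (beginID endID : Int) (bl : List (List Int)) (lvl : Int) :
    Nat → List Int → Int → Int → Int
  | 0, _, _, cnt => cnt
  | f + 1, st, ptr, cnt =>
    if ptr < endID then
      pvCount beginID endID bl lvl f st (pvNext bl lvl (ptr - beginID))
        (if pvStGet st (ptr - beginID) = 0 then cnt + 1 else cnt)
    else cnt

-- 'while scanned_blocks<this_level_blocks-m' skipping loop; returns (pointer, scanned)
def pvSkip (beginID endID : Int) (bl : List (List Int)) (lvl : Int) :
    Nat → List Int → Int → Int → Int → Int × Int
  | 0, _, ptr, scanned, _ => (ptr, scanned)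
  | f + 1, st, ptr, scanned, target =>
    if scanned < target then
      pvSkip beginID endID bl lvl f st (pvNext bl lvl (ptr - beginID))
        (if pvStGet st (ptr - beginID) = 0 then scanned + 1 else scanned) target
    else (ptr, scanned)

-- 'while scanned_blocks<this_level_blocks' appending loop; returns (appended blocks, new state)
def pvAppend (beginID endID : Int) (bl : List (List Int)) (lvl : Int) :
    Nat → List Int → Int → Int → Int → List Int × List Int
  | 0, st, _, _, _ => ([], st)
  | f + 1, st, ptr, scanned, total =>
    if scanned < total then
      if pvStGet st (ptr - beginID) = 0 then
        let r := pvAppend beginID endID bl lvl f (pvMark st (ptr - beginID))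
          (pvNext bl lvl (ptr - beginID)) (scanned + 1) total
        (ptr :: r.1, r.2)
      else
        pvAppend beginID endID bl lvl f st (pvNext bl lvl (ptr - beginID)) scanned total
    else ([], st)

-- outer 'while this_level>0' loop (fuel = max_level.toNat is exact: the level drops by 1 each pass)
def pvLoopA (m beginID endID : Int) (bl : List (List Int)) :
    Nat → Int → List Int → List Int → List Int
  | 0, _, _, chosen => chosen
  | f + 1, lvl, st, chosen =>
    if 0 < lvl then
      let fw := (endID - beginID).toNat + 1
      let cnt := pvCount beginID endID bl lvl fw st beginID 0
      if cnt < m then pvLoopA m beginID endID bl f (lvl - 1) st chosen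
      else
        let ps := pvSkip beginID endID bl lvl fw st beginID 0 (cnt - m)
        let r := pvAppend beginID endID bl lvl fw st ps.1 ps.2 cnt
        pvLoopA m beginID endID bl f (lvl - 1) r.2 (chosen ++ r.1)
    else chosen

def scan_blocklist_no_repeat (m : Int) (beginID : Int) (endID : Int) (blocklist : List (List Int)) (max_level : Int) : List Int :=
  pvLoopA m beginID endID blocklist max_level.toNat max_level
    (List.replicate (endID - beginID).toNat 0) []

-- ===== PORT B =====
-- one walk per level collecting the unvisited blocks in traversal order
def pvCollect (beginID endID : Int) (bl : List (List Int)) (lvl : Int) :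
    Nat → List Int → Int → List Int
  | 0, _, _ => []
  | f + 1, st, ptr =>
    if ptr < endID then
      if pvStGet st (ptr - beginID) = 0 then
        ptr :: pvCollect beginID endID bl lvl f st (pvNext bl lvl (ptr - beginID))
      else pvCollect beginID endID bl lvl f st (pvNext bl lvl (ptr - beginID))
    else []

-- 'for b in last: visited[b-beginID]=1'
def pvMarkAll (beginID : Int) (xs : List Int) (st : List Int) : List Int :=
  xs.foldl (fun s b => pvMark s (b - beginID)) st

-- 'for level in range(max_level,0,-1)'
def pvLoopB (m beginID endID : Int) (bl : List (List Int)) :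
    Nat → Int → List Int → List Int → List Int
  | 0, _, _, chosen => chosen
  | f + 1, lvl, st, chosen =>
    if 0 < lvl then
      let C := pvCollect beginID endID bl lvl ((endID - beginID).toNat + 1) st beginID
      if m ≤ (C.length : Int) then
        let last := PySem.List.slice C (some ((C.length : Int) - m)) none
        pvLoopB m beginID endID bl f (lvl - 1) (pvMarkAll beginID last st) (chosen ++ last)
      else pvLoopB m beginID endID bl f (lvl - 1) st chosen
    else chosen

def scan_blocklist_no_repeat_alt (m : Int) (beginID : Int) (endID : Int) (blocklist : List (List Int)) (max_level : Int) : List Int :=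
  pvLoopB m beginID endID blocklist max_level.toNat max_level
    (List.replicate (endID - beginID).toNat 0) []

-- ===== PRECONDITION & SPEC =====
-- Pre_ admits well-formed skip lists over [beginID,endID) with 0 <= m: outside them A raises
-- IndexError or loops forever on almost all inputs (a negative m with a positive level, a row
-- shorter than max_level+1, a level pointer that does not move strictly forward). Because it
-- asks this of every row — also rows the traversal never reaches, and backward pointers, which
-- Python resolves from the end of the list — it excludes a few inputs on which A still
-- returns (see claim cites; A and B agree on those).
def Pre_scan_blocklist_no_repeat (m : Int) (beginID : Int) (endID : Int) (blocklist : List (List Int)) (max_level : Int) : Prop :=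
  max_level ≤ 0 ∨ (0 ≤ m ∧ (endID - beginID).toNat ≤ blocklist.length ∧
    ∀ p ∈ (blocklist.take (endID - beginID).toNat).zipIdx,
      max_level < (p.1.length : Int) ∧
      ∀ l : Nat, l < p.1.length →
        0 < (l : Int) → (l : Int) ≤ max_level →
        beginID + (p.2 : Int) < p.1.getD l 0)
instance (m : Int) (beginID : Int) (endID : Int) (blocklist : List (List Int)) (max_level : Int) : Decidable (Pre_scan_blocklist_no_repeat m beginID endID blocklist max_level) := by unfold Pre_scan_blocklist_no_repeat; infer_instance

def pvWitness_scan_blocklist_no_repeat : Int × Int × Int × List (List Int) × Int :=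
  (1, 0, 2, [[0, 1], [0, 2]], 1)

def Spec_scan_blocklist_no_repeat (m : Int) (beginID : Int) (endID : Int) (blocklist : List (List Int)) (max_level : Int) (out : List Int) : Prop := out = scan_blocklist_no_repeat_alt m beginID endID blocklist max_level
instance (m : Int) (beginID : Int) (endID : Int) (blocklist : List (List Int)) (max_level : Int) (out : List Int) : Decidable (Spec_scan_blocklist_no_repeat m beginID endID blocklist max_level out) := by unfold Spec_scan_blocklist_no_repeat; infer_instance

-- ===== CLAIM (what is proved, stated in full; the proofs are below) =====
def Claim_equal_scan_blocklist_no_repeat : Prop := ∀ (m : Int) (beginID : Int) (endID : Int) (blocklist : List (List Int)) (max_level : Int), Dom_scan_blocklist_no_repeat m beginID endID blocklist max_level → Pre_scan_blocklist_no_repeat m beginID endID blocklist max_level → Spec_scan_blocklist_no_repeat m beginID endID blocklist max_level (scan_blocklist_no_repeat m beginID endID blocklist max_level)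

-- ===== LEMMAS AND PROOFS =====

-- the one chain property everything runs on: each used pointer moves strictly forward
def pvStepUp (beginID endID : Int) (bl : List (List Int)) (lvl : Int) : Prop :=
  ∀ q : Int, beginID ≤ q → q < endID → q < pvNext bl lvl (q - beginID)

theorem pvWitness_ok :
    Dom_scan_blocklist_no_repeat pvWitness_scan_blocklist_no_repeat.1 pvWitness_scan_blocklist_no_repeat.2.1 pvWitness_scan_blocklist_no_repeat.2.2.1 pvWitness_scan_blocklist_no_repeat.2.2.2.1 pvWitness_scan_blocklist_no_repeat.2.2.2.2 ∧
    Pre_scan_blocklist_no_repeat pvWitness_scan_blocklist_no_repeat.1 pvWitness_scan_blocklist_no_repeat.2.1 pvWitness_scan_blocklist_no_repeat.2.2.1 pvWitness_scan_blocklist_no_repeat.2.2.2.1 pvWitness_scan_blocklist_no_repeat.2.2.2.2 := by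
  constructor <;> decide

theorem pre_stepUp (beginID endID : Int) (bl : List (List Int)) (max_level : Int)
    (hlen : (endID - beginID).toNat ≤ bl.length)
    (hall : ∀ p ∈ (bl.take (endID - beginID).toNat).zipIdx,
      max_level < (p.1.length : Int) ∧
      ∀ l : Nat, l < p.1.length → 0 < (l : Int) → (l : Int) ≤ max_level →
        beginID + (p.2 : Int) < p.1.getD l 0)
    (lvl : Int) (h1 : 1 ≤ lvl) (h2 : lvl ≤ max_level) :
    pvStepUp beginID endID bl lvl := by
  intro q hq1 hq2
  have hi' : ((q - beginID).toNat : Int) = q - beginID := by omega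
  set i : Nat := (q - beginID).toNat with hidef
  have hiN : i < (endID - beginID).toNat := by omega
  have hilen : i < bl.length := by omega
  have hitake : i < (bl.take (endID - beginID).toNat).length := by
    simp only [List.length_take]; omega
  have hmem : ((bl.take (endID - beginID).toNat)[i], i)
      ∈ (bl.take (endID - beginID).toNat).zipIdx := by
    have hz : ((bl.take (endID - beginID).toNat).zipIdx)[i]'(by
        simp only [List.length_zipIdx]; exact hitake)
        = ((bl.take (endID - beginID).toNat)[i], i) := by
      simp [List.getElem_zipIdx]
    exact hz ▸ List.getElem_mem _
  have htake : (bl.take (endID - beginID).toNat)[i]'hitake = bl[i] := by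
    simp [List.getElem_take]
  obtain ⟨hrow, hbound⟩ := hall _ hmem
  dsimp only at hrow hbound
  rw [htake] at hrow hbound
  have hl : lvl.toNat < bl[i].length := by omega
  have e1 : PySem.List.pyGet? bl (q - beginID) = some bl[i] := by
    rw [← hi', PySem.List.pyGet?_natCast, List.getElem?_eq_getElem hilen]
  have e2 : PySem.List.pyGet? bl[i] lvl = some (bl[i].getD lvl.toNat 0) := by
    rw [PySem.List.pyGet?_of_nonneg _ (by omega), List.getElem?_eq_getElem hl,
      List.getD_eq_getElem _ _ hl]
  have hb := hbound lvl.toNat hl (by omega) (by omega)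
  unfold pvNext
  rw [e1, Option.getD_some, e2, Option.getD_some]
  omega

theorem pvCollect_of_not_lt (beginID endID : Int) (bl : List (List Int)) (lvl : Int)
    (f : Nat) (st : List Int) (ptr : Int) (h : ¬ ptr < endID) :
    pvCollect beginID endID bl lvl f st ptr = [] := by
  cases f <;> simp [pvCollect, h]

theorem pvCollect_irrel (beginID endID : Int) (bl : List (List Int)) (lvl : Int)
    (hSU : pvStepUp beginID endID bl lvl) (st : List Int) :
    ∀ f g : Nat, ∀ ptr : Int, beginID ≤ ptr → (endID - ptr).toNat ≤ f → (endID - ptr).toNat ≤ g →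
      pvCollect beginID endID bl lvl f st ptr = pvCollect beginID endID bl lvl g st ptr := by
  intro f
  induction f with
  | zero =>
    intro g ptr hb hf hg
    have h : ¬ ptr < endID := by omega
    rw [pvCollect_of_not_lt _ _ _ _ _ _ _ h, pvCollect_of_not_lt _ _ _ _ _ _ _ h]
  | succ f ih =>
    intro g ptr hb hf hg
    by_cases h : ptr < endID
    · cases g with
      | zero => omega
      | succ g =>
        have hstep := hSU ptr hb h
        have hb' : beginID ≤ pvNext bl lvl (ptr - beginID) := by omega
        have hf' : (endID - pvNext bl lvl (ptr - beginID)).toNat ≤ f := by omega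
        have hg' : (endID - pvNext bl lvl (ptr - beginID)).toNat ≤ g := by omega
        by_cases h0 : pvStGet st (ptr - beginID) = 0 <;>
          simp [pvCollect, h, h0, ih g _ hb' hf' hg']
    · rw [pvCollect_of_not_lt _ _ _ _ _ _ _ h, pvCollect_of_not_lt _ _ _ _ _ _ _ h]

theorem pvStGet_mark_ne (st : List Int) (i j : Int) (hi : 0 ≤ i) (hj : 0 ≤ j) (hne : i ≠ j) :
    pvStGet (pvMark st i) j = pvStGet st j := by
  have hij : i.toNat ≠ j.toNat := by omega
  simp only [pvStGet, pvMark, if_pos hi]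
  rw [PySem.List.pyGet?_of_nonneg _ hj, PySem.List.pyGet?_of_nonneg _ hj,
    List.getElem?_set_ne hij]

theorem pvCollect_mark (beginID endID : Int) (bl : List (List Int)) (lvl : Int)
    (hSU : pvStepUp beginID endID bl lvl) (st : List Int) (p0 : Int) (hp0 : beginID ≤ p0) :
    ∀ f : Nat, ∀ ptr : Int, p0 < ptr →
      pvCollect beginID endID bl lvl f (pvMark st (p0 - beginID)) ptr
        = pvCollect beginID endID bl lvl f st ptr := by
  intro f
  induction f with
  | zero => intro ptr _; rfl
  | succ f ih =>
    intro ptr hlt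
    by_cases h : ptr < endID
    · have hget := pvStGet_mark_ne st (p0 - beginID) (ptr - beginID) (by omega) (by omega) (by omega)
      have hstep := hSU ptr (by omega) h
      simp only [pvCollect, if_pos h, hget]
      by_cases h0 : pvStGet st (ptr - beginID) = 0 <;> simp [h0] <;>
        exact ih _ (by omega)
    · simp [pvCollect, h]

theorem pvCount_collect (beginID endID : Int) (bl : List (List Int)) (lvl : Int) :
    ∀ f : Nat, ∀ st : List Int, ∀ ptr cnt : Int,
      pvCount beginID endID bl lvl f st ptr cnt
        = cnt + ((pvCollect beginID endID bl lvl f st ptr).length : Int) := by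
  intro f
  induction f with
  | zero => intro st ptr cnt; simp [pvCount, pvCollect]
  | succ f ih =>
    intro st ptr cnt
    by_cases h : ptr < endID
    · by_cases h0 : pvStGet st (ptr - beginID) = 0 <;>
        simp [pvCount, pvCollect, h, h0, ih] <;> push_cast <;> ring
    · simp [pvCount, pvCollect, h]

theorem pvSkip_collect (beginID endID : Int) (bl : List (List Int)) (lvl : Int)
    (hSU : pvStepUp beginID endID bl lvl) (st : List Int) :
    ∀ f : Nat, ∀ ptr s k : Int, beginID ≤ ptr → (endID - ptr).toNat ≤ f → 0 ≤ k →
      k ≤ ((pvCollect beginID endID bl lvl f st ptr).length : Int) →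
      ∃ p' : Int, pvSkip beginID endID bl lvl f st ptr s (s + k) = (p', s + k) ∧
        beginID ≤ p' ∧ (endID - p').toNat ≤ f ∧
        ∀ g : Nat, (endID - p').toNat ≤ g →
          pvCollect beginID endID bl lvl g st p'
            = (pvCollect beginID endID bl lvl f st ptr).drop k.toNat := by
  intro f
  induction f with
  | zero =>
    intro ptr s k hb hf h0k hk
    have hlt : ¬ ptr < endID := by omega
    simp only [pvCollect, List.length_nil, Int.natCast_zero] at hk
    have hk0 : k = 0 := by omega
    refine ⟨ptr, by simp [pvSkip, hk0], hb, hf, ?_⟩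
    intro g hg
    rw [pvCollect_of_not_lt _ _ _ _ _ _ _ hlt, pvCollect_of_not_lt _ _ _ _ _ _ _ hlt]
    simp
  | succ f ih =>
    intro ptr s k hb hf h0k hk
    by_cases hkpos : 0 < k
    · have hlt : ptr < endID := by
        by_contra h
        rw [pvCollect_of_not_lt _ _ _ _ _ _ _ h] at hk
        simp at hk; omega
      have hstep := hSU ptr hb hlt
      have hb' : beginID ≤ pvNext bl lvl (ptr - beginID) := by omega
      have hf' : (endID - pvNext bl lvl (ptr - beginID)).toNat ≤ f := by omega
      by_cases h0 : pvStGet st (ptr - beginID) = 0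
      · have hceq : pvCollect beginID endID bl lvl (f + 1) st ptr
            = ptr :: pvCollect beginID endID bl lvl f st (pvNext bl lvl (ptr - beginID)) := by
          simp [pvCollect, hlt, h0]
        have hCk : k - 1 ≤ ((pvCollect beginID endID bl lvl f st (pvNext bl lvl (ptr - beginID))).length : Int) := by
          rw [hceq] at hk; simp at hk; omega
        obtain ⟨p', hskip, hbp, hfp, hcol⟩ := ih (pvNext bl lvl (ptr - beginID)) (s + 1) (k - 1) hb' hf' (by omega) hCk
        refine ⟨p', ?_, hbp, by omega, ?_⟩
        · simp only [pvSkip, if_pos (show s < s + k by omega), if_pos h0]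
          have he : s + k = (s + 1) + (k - 1) := by ring
          rw [he, hskip]
        · intro g hg
          rw [hcol g hg, hceq]
          have hk1 : k.toNat = (k - 1).toNat + 1 := by omega
          rw [hk1, List.drop_succ_cons]
      · have hceq : pvCollect beginID endID bl lvl (f + 1) st ptr
            = pvCollect beginID endID bl lvl f st (pvNext bl lvl (ptr - beginID)) := by
          simp [pvCollect, hlt, h0]
        rw [hceq] at hk
        obtain ⟨p', hskip, hbp, hfp, hcol⟩ := ih (pvNext bl lvl (ptr - beginID)) s k hb' hf' h0k hk
        refine ⟨p', ?_, hbp, by omega, ?_⟩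
        · simp only [pvSkip, if_pos (show s < s + k by omega), if_neg h0]
          exact hskip
        · intro g hg
          rw [hcol g hg, hceq]
    · have hk0 : k = 0 := by omega
      refine ⟨ptr, by simp [pvSkip, hk0], hb, hf, ?_⟩
      intro g hg
      rw [hk0]
      simpa using pvCollect_irrel beginID endID bl lvl hSU st g (f + 1) ptr hb hg hf

theorem pvAppend_collect (beginID endID : Int) (bl : List (List Int)) (lvl : Int)
    (hSU : pvStepUp beginID endID bl lvl) :
    ∀ f : Nat, ∀ st : List Int, ∀ ptr s : Int, beginID ≤ ptr → (endID - ptr).toNat ≤ f →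
      pvAppend beginID endID bl lvl f st ptr s
          (s + ((pvCollect beginID endID bl lvl f st ptr).length : Int))
        = (pvCollect beginID endID bl lvl f st ptr,
           pvMarkAll beginID (pvCollect beginID endID bl lvl f st ptr) st) := by
  intro f
  induction f with
  | zero =>
    intro st ptr s hb hf
    simp [pvAppend, pvCollect, pvMarkAll]
  | succ f ih =>
    intro st ptr s hb hf
    by_cases hlt : ptr < endID
    · have hstep := hSU ptr hb hlt
      have hb' : beginID ≤ pvNext bl lvl (ptr - beginID) := by omega
      have hf' : (endID - pvNext bl lvl (ptr - beginID)).toNat ≤ f := by omega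
      by_cases h0 : pvStGet st (ptr - beginID) = 0
      · have hceq : pvCollect beginID endID bl lvl (f + 1) st ptr
            = ptr :: pvCollect beginID endID bl lvl f st (pvNext bl lvl (ptr - beginID)) := by
          simp [pvCollect, hlt, h0]
        have hmark := pvCollect_mark beginID endID bl lvl hSU st ptr hb f
          (pvNext bl lvl (ptr - beginID)) hstep
        have hIH := ih (pvMark st (ptr - beginID)) (pvNext bl lvl (ptr - beginID)) (s + 1) hb' hf'
        rw [hmark] at hIH
        rw [hceq]
        have he : s + (((ptr :: pvCollect beginID endID bl lvl f st (pvNext bl lvl (ptr - beginID))).length : Nat) : Int)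
            = (s + 1) + ((pvCollect beginID endID bl lvl f st (pvNext bl lvl (ptr - beginID))).length : Int) := by
          simp only [List.length_cons]; push_cast; ring
        simp only [pvAppend, he, if_pos (show s < (s + 1) + ((pvCollect beginID endID bl lvl f st (pvNext bl lvl (ptr - beginID))).length : Int) by omega), if_pos h0, hIH]
        simp [pvMarkAll]
      · have hceq : pvCollect beginID endID bl lvl (f + 1) st ptr
            = pvCollect beginID endID bl lvl f st (pvNext bl lvl (ptr - beginID)) := by
          simp [pvCollect, hlt, h0]
        rw [hceq]
        by_cases hcond : s < s + ((pvCollect beginID endID bl lvl f st (pvNext bl lvl (ptr - beginID))).length : Int)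
        · simp only [pvAppend, if_pos hcond, if_neg h0]
          exact ih st (pvNext bl lvl (ptr - beginID)) s hb' hf'
        · have hlen : (pvCollect beginID endID bl lvl f st (pvNext bl lvl (ptr - beginID))).length = 0 := by
            omega
          rw [List.eq_nil_of_length_eq_zero hlen]
          simp [pvAppend, pvMarkAll]
    · rw [pvCollect_of_not_lt _ _ _ _ _ _ _ hlt]
      simp [pvAppend, pvMarkAll]

theorem pvLoops_eq (m beginID endID : Int) (bl : List (List Int)) (hm : 0 ≤ m) :
    ∀ f : Nat, ∀ lvl : Int, ∀ st chosen : List Int,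
      (∀ l : Int, 1 ≤ l → l ≤ lvl → pvStepUp beginID endID bl l) →
      pvLoopA m beginID endID bl f lvl st chosen = pvLoopB m beginID endID bl f lvl st chosen := by
  intro f
  induction f with
  | zero => intro lvl st chosen _; rfl
  | succ f ih =>
    intro lvl st chosen hSU
    by_cases hl : 0 < lvl
    · have SU := hSU lvl (by omega) le_rfl
      have hcnt : pvCount beginID endID bl lvl ((endID - beginID).toNat + 1) st beginID 0
          = ((pvCollect beginID endID bl lvl ((endID - beginID).toNat + 1) st beginID).length : Int) := by
        rw [pvCount_collect]; ring
      simp only [pvLoopA, pvLoopB, if_pos hl, hcnt]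
      by_cases hm2 : ((pvCollect beginID endID bl lvl ((endID - beginID).toNat + 1) st beginID).length : Int) < m
      · rw [if_pos hm2, if_neg (by omega)]
        exact ih (lvl - 1) st chosen (fun l a b => hSU l a (by omega))
      · rw [if_neg hm2, if_pos (by omega)]
        obtain ⟨p', hskip, hbp, hfp, hcol⟩ := pvSkip_collect beginID endID bl lvl SU st
          ((endID - beginID).toNat + 1) beginID 0
          (((pvCollect beginID endID bl lvl ((endID - beginID).toNat + 1) st beginID).length : Int) - m)
          le_rfl (by omega) (by omega) (by omega)
        rw [zero_add] at hskip
        have hcolp := hcol ((endID - beginID).toNat + 1) hfp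
        have happ := pvAppend_collect beginID endID bl lvl SU ((endID - beginID).toNat + 1) st p'
          (((pvCollect beginID endID bl lvl ((endID - beginID).toNat + 1) st beginID).length : Int) - m) hbp hfp
        rw [hcolp] at happ
        have heq : (((pvCollect beginID endID bl lvl ((endID - beginID).toNat + 1) st beginID).length : Int) - m)
            + (((pvCollect beginID endID bl lvl ((endID - beginID).toNat + 1) st beginID).drop
                ((((pvCollect beginID endID bl lvl ((endID - beginID).toNat + 1) st beginID).length : Int) - m)).toNat).length : Int)
            = ((pvCollect beginID endID bl lvl ((endID - beginID).toNat + 1) st beginID).length : Int) := by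
          simp only [List.length_drop]; omega
        rw [heq] at happ
        rw [hskip]
        dsimp only
        rw [happ]
        dsimp only
        rw [PySem.List.slice_from _ (by omega : (0:Int) ≤ ((pvCollect beginID endID bl lvl ((endID - beginID).toNat + 1) st beginID).length : Int) - m)]
        exact ih (lvl - 1) _ _ (fun l a b => hSU l a (by omega))
    · simp [pvLoopA, pvLoopB, hl]

-- ===== VERDICT (by name: the statement is the Claim_ definition above) =====
theorem scan_blocklist_no_repeat_spec : Claim_equal_scan_blocklist_no_repeat := by
  intro m beginID endID bl max_level _ hPre
  unfold Spec_scan_blocklist_no_repeat scan_blocklist_no_repeat scan_blocklist_no_repeat_alt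
  rcases hPre with h | ⟨hm, hlen, hall⟩
  · have : max_level.toNat = 0 := by omega
    rw [this]; rfl
  · exact pvLoops_eq m beginID endID bl hm max_level.toNat max_level _ []
      (fun l h1 h2 => pre_stepUp beginID endID bl max_level hlen hall l h1 h2)
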